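-- pv_equiv track=rewrite | github.com/phj0446/Soon | 프로그래머스/unrated/181874. A 강조하기/A 강조하기.py | solution
-- ===== SOURCE A (Python) =====
-- def solution(myString):
--     answer = ''
--     for i in myString:
--         if i == 'a':
--             answer += 'A'
--         elif i == 'A':
--             answer += 'A'
--         else:
--             a = i.islower()
--             if a == True:
--                 answer += i
--             else:
--                 answer += i.lower()
--     return answer
-- ===== SOURCE B (Python) =====
-- def solution(myString):
--     return myString.lower().replace('a', 'A')
-- ===== Notes on version B (the rewrite author's own statement) =====
-- stated objective: idiomatic
-- what changed: Replaced the per-character branching loop that builds the answer by string concatenation with two whole-string builtin passes: lowercase everything, then replace the lowercase-a character with its uppercase form.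
import Mathlib
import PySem

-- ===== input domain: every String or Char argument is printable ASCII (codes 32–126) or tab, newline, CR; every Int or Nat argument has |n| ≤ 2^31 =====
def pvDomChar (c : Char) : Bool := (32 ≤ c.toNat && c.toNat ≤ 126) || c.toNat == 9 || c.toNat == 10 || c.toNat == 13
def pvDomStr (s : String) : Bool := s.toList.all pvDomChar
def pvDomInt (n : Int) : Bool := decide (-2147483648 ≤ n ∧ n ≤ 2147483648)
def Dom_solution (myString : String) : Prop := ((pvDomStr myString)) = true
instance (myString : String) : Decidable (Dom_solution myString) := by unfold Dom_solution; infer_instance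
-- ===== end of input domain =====

-- B replaces A's per-character branching loop by two whole-string passes: lower() then replace('a','A').

-- ===== PORT A =====
-- literal port of A's loop: accumulate answer char by char with the same branch order
def solution (myString : String) : String :=
  String.ofList (myString.toList.foldl (fun answer i =>
    if i = 'a' then answer ++ ['A']
    else if i = 'A' then answer ++ ['A']
    else
      let a := PySem.Chars.islower i
      if a = true then answer ++ [i]
      else answer ++ PySem.Chars.lower [i]) [])

-- ===== PORT B =====
def solution_alt (myString : String) : String :=
  PySem.Str.replace (PySem.Str.lower myString) "a" "A"

-- ===== PRECONDITION & SPEC =====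
def Spec_solution (myString : String) (out : String) : Prop := out = solution_alt myString
instance (myString : String) (out : String) : Decidable (Spec_solution myString out) := by unfold Spec_solution; infer_instance

-- ===== CLAIM (what is proved, stated in full; the proofs are below) =====
def Claim_equal_solution : Prop := ∀ (myString : String), Dom_solution myString → Spec_solution myString (solution myString)

-- ===== LEMMAS AND PROOFS =====

-- the per-character function both programs compute
def pvStep (c : Char) : Char :=
  if PySem.Chars.lowerChar c = 'a' then 'A' else PySem.Chars.lowerChar c

lemma pv_toNat_le {a b : Char} (h : a ≤ b) : a.toNat ≤ b.toNat := Fin.mk_le_mk.mp h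

lemma pv_lowerChar_islower (c : Char) (h : PySem.Chars.islower c = true) :
    PySem.Chars.lowerChar c = c := by
  simp only [PySem.Chars.islower, Bool.and_eq_true, decide_eq_true_eq] at h
  have h97 : 97 ≤ c.toNat := pv_toNat_le h.1
  simp only [PySem.Chars.lowerChar, PySem.Chars.isupper]
  rw [if_neg]
  simp only [Bool.and_eq_true, decide_eq_true_eq, not_and]
  intro _ hZ
  have := pv_toNat_le hZ
  simp at this; omega

lemma pv_lowerChar_ne_a (c : Char) (h1 : c ≠ 'a') (h2 : c ≠ 'A') :
    PySem.Chars.lowerChar c ≠ 'a' := by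
  simp only [PySem.Chars.lowerChar]
  split
  · next hu =>
    simp only [PySem.Chars.isupper, Bool.and_eq_true, decide_eq_true_eq] at hu
    intro h
    apply h2
    have h65 : 65 ≤ c.toNat := pv_toNat_le hu.1
    have h90 : c.toNat ≤ 90 := pv_toNat_le hu.2
    have hv : (c.toNat + 32).isValidChar := by constructor; omega
    have heq : (Char.ofNat (c.toNat + 32)).toNat = c.toNat + 32 := by
      simp [Char.ofNat, hv]
    rw [h] at heq
    have hcn : c.toNat = 65 := by simp at heq; omega
    have := Char.ofNat_toNat c
    rw [hcn] at this
    exact this.symm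
  · exact h1

lemma pvA_foldl (cs : List Char) (acc : List Char) :
    cs.foldl (fun answer i =>
      if i = 'a' then answer ++ ['A']
      else if i = 'A' then answer ++ ['A']
      else
        let a := PySem.Chars.islower i
        if a = true then answer ++ [i]
        else answer ++ PySem.Chars.lower [i]) acc = acc ++ cs.map pvStep := by
  induction cs generalizing acc with
  | nil => simp
  | cons c t ih =>
    simp only [List.foldl_cons, List.map_cons]
    rw [ih]
    have hc : (if c = 'a' then acc ++ ['A']
      else if c = 'A' then acc ++ ['A']
      else
        let a := PySem.Chars.islower c
        if a = true then acc ++ [c]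
        else acc ++ PySem.Chars.lower [c]) = acc ++ [pvStep c] := by
      by_cases h1 : c = 'a'
      · simp [h1, pvStep, PySem.Chars.lowerChar, PySem.Chars.isupper]
      · by_cases h2 : c = 'A'
        · simp [h2, pvStep, PySem.Chars.lowerChar, PySem.Chars.isupper]
        · by_cases h3 : PySem.Chars.islower c = true
          · have he := pv_lowerChar_islower c h3
            simp [h1, h2, h3, pvStep, he]
          · have hne : PySem.Chars.lowerChar c ≠ 'a' := pv_lowerChar_ne_a c h1 h2
            simp [h1, h2, h3, pvStep, hne, PySem.Chars.lower]
    rw [hc]; simp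

lemma pvReplace_go (fuel : Nat) (l acc : List Char) (h : l.length ≤ fuel) :
    PySem.Chars.replace.go ['a'] ['A'] fuel l acc =
      acc.reverse ++ l.map (fun c => if c = 'a' then 'A' else c) := by
  induction fuel generalizing l acc with
  | zero =>
    have : l = [] := List.length_eq_zero_iff.mp (Nat.le_zero.mp h)
    subst this; simp [PySem.Chars.replace.go]
  | succ n ih =>
    cases l with
    | nil => simp [PySem.Chars.replace.go]
    | cons c t =>
      simp only [PySem.Chars.replace.go]
      by_cases hc : c = 'a'
      · have hp : ['a'].isPrefixOf (c :: t) = true := by simp [hc, List.isPrefixOf]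
        rw [if_pos hp, ih _ _ (by simpa using Nat.lt_succ_iff.mp (by simpa using h))]
        simp [hc]
      · have hp : ['a'].isPrefixOf (c :: t) = false := by
          simp [List.isPrefixOf]; exact fun h' => hc h'.symm
        rw [if_neg (by simp [hp]), ih t (c :: acc) (by simpa using Nat.lt_succ_iff.mp (by simpa using h))]
        simp [hc]

lemma pvReplace_lower (cs : List Char) :
    PySem.Chars.replace (PySem.Chars.lower cs) ['a'] ['A'] = cs.map pvStep := by
  simp only [PySem.Chars.replace, List.isEmpty_cons]
  rw [if_neg (by decide)]
  rw [pvReplace_go _ _ _ (le_refl _)]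
  simp [PySem.Chars.lower, pvStep, Function.comp]

-- ===== VERDICT (by name: the statement is the Claim_ definition above) =====
theorem solution_spec : Claim_equal_solution := by
  intro s _
  show String.ofList _ = _
  have hB : (solution_alt s).toList = PySem.Chars.replace (PySem.Chars.lower s.toList) ['a'] ['A'] := by
    simp [solution_alt, PySem.Str.replace, PySem.Str.lower]
  rw [pvA_foldl]
  apply String.toList_injective
  rw [hB, pvReplace_lower]
  simp
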